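-- pv_equiv track=rewrite | github.com/chahyoungseok/Algorithm | 백준/Gold/2064. IP 주소/IP 주소.py | findMask
-- ===== SOURCE A (Python) =====
-- def findMask(min_value, max_value):
--     mask = 0xFFFFFFFF
--     while True:
--         network_min = min_value & mask
--         network_max = network_min | ~mask & 0xFFFFFFFF
--
--         # max_value가 네트워크 범위 안에 들어오면 반복 종료
--         if network_min <= max_value <= network_max:
--             break
--
--         mask <<= 1
--
--     return mask & 0xFFFFFFFF
-- ===== SOURCE B (Python) =====
-- def findMask(min_value, max_value):
--     # closed form: the loop in A stops at the first shift k for which min and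
--     # max agree on all bits >= k, i.e. k = bit length of min ^ max
--     k = (min_value ^ max_value).bit_length()
--     return (0xFFFFFFFF << k) & 0xFFFFFFFF
-- ===== Notes on version B (the rewrite author's own statement) =====
-- stated objective: simpler
-- what changed: Replaces A's mask-widening while-loop with a closed form: the loop's first break happens exactly at shift k = (min_value ^ max_value).bit_length(), so B computes (0xFFFFFFFF << k) & 0xFFFFFFFF directly with no loop.
-- intended difference: On the single in-domain input (-2**31, 2**31) A's unmasked comparison accidentally terminates at the first iteration and returns 4294967295, although the endpoints share no high bits; B returns 0, the mask actually common to both endpoints, which is the intended value (on every other input with a negative endpoint A loops forever, excluded by Pre_). — e.g. on findMask(-2147483648, 2147483648): A returns 4294967295, B returns 0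
import Mathlib
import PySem

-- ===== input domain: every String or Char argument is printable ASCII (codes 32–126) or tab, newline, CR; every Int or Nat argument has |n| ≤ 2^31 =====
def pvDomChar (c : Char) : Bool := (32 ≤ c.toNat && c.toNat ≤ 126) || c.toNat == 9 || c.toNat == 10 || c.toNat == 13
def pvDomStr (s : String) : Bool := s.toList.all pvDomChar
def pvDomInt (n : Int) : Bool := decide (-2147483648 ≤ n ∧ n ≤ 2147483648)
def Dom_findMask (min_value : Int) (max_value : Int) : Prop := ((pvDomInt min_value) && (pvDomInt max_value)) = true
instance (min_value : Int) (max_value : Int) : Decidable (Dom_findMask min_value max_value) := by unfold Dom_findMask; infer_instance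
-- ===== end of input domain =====

-- B replaces A's mask-widening while-loop by the closed form (0xFFFFFFFF << bit_length(min^max)) & 0xFFFFFFFF (objective: simpler).


-- ===== PORT A =====
-- A's 'while True' loop, fueled: inside Pre_ the loop always breaks within 33
-- iterations (see proofs), so fuel 64 is never exhausted there.
def findMaskLoop (min_value : Int) (max_value : Int) : Nat → Int → Int
  | 0, mask => PySem.Int.band mask 0xFFFFFFFF   -- fuel exhausted (unreachable under Pre_)
  | fuel + 1, mask =>
    let network_min := PySem.Int.band min_value mask
    let network_max := PySem.Int.bor network_min (PySem.Int.band (Int.not mask) 0xFFFFFFFF)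
    if network_min ≤ max_value ∧ max_value ≤ network_max then
      PySem.Int.band mask 0xFFFFFFFF
    else
      findMaskLoop min_value max_value fuel (mask <<< 1)

def findMask (min_value : Int) (max_value : Int) : Int :=
  findMaskLoop min_value max_value 64 0xFFFFFFFF

-- ===== PORT B =====
def findMask_alt (min_value : Int) (max_value : Int) : Int :=
  let k := PySem.Int.bitLength (PySem.Int.bxor min_value max_value)
  PySem.Int.band ((0xFFFFFFFF : Int) <<< k) 0xFFFFFFFF

-- ===== PRECONDITION & SPEC =====
-- Pre_ excludes the inputs on which A never returns: with a negative endpoint the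
-- loop diverges, except at the single point (-2^31, 2^31), which Pre_ keeps (it is D_).
def Pre_findMask (min_value : Int) (max_value : Int) : Prop :=
  (0 ≤ min_value ∧ 0 ≤ max_value) ∨ (min_value = -2147483648 ∧ max_value = 2147483648)
instance (min_value : Int) (max_value : Int) : Decidable (Pre_findMask min_value max_value) := by
  unfold Pre_findMask; infer_instance

def pvWitness_findMask : Int × Int := (5, 9)

-- On (-2**31, 2**31) A's unmasked comparison accidentally terminates at the first
-- iteration and returns 4294967295, although the endpoints share no high bits;
-- B returns 0, the mask actually common to both endpoints, the intended value.
def D_findMask (min_value : Int) (max_value : Int) : Prop :=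
  min_value = -2147483648 ∧ max_value = 2147483648
instance (min_value : Int) (max_value : Int) : Decidable (D_findMask min_value max_value) := by
  unfold D_findMask; infer_instance

def Spec_findMask (min_value : Int) (max_value : Int) (out : Int) : Prop :=
  ¬ D_findMask min_value max_value → out = findMask_alt min_value max_value
instance (min_value : Int) (max_value : Int) (out : Int) : Decidable (Spec_findMask min_value max_value out) := by
  unfold Spec_findMask; infer_instance

def pvDiffWitness_findMask : Int × Int := (-2147483648, 2147483648)
def pvDiffWitnessOut_findMask : Int × Int := (4294967295, 0)

-- ===== CLAIM =====
def Claim_unchanged_findMask : Prop := ∀ (min_value : Int) (max_value : Int), Dom_findMask min_value max_value → Pre_findMask min_value max_value → Spec_findMask min_value max_value (findMask min_value max_value)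
def Claim_changed_findMask : Prop := Dom_findMask (pvDiffWitness_findMask.1) (pvDiffWitness_findMask.2) ∧ Pre_findMask (pvDiffWitness_findMask.1) (pvDiffWitness_findMask.2) ∧ D_findMask (pvDiffWitness_findMask.1) (pvDiffWitness_findMask.2) ∧ findMask (pvDiffWitness_findMask.1) (pvDiffWitness_findMask.2) = pvDiffWitnessOut_findMask.1 ∧ findMask_alt (pvDiffWitness_findMask.1) (pvDiffWitness_findMask.2) = pvDiffWitnessOut_findMask.2 ∧ pvDiffWitnessOut_findMask.1 ≠ pvDiffWitnessOut_findMask.2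
def Claim_exact_findMask : Prop := ∀ (min_value : Int) (max_value : Int), Dom_findMask min_value max_value → Pre_findMask min_value max_value → D_findMask min_value max_value → findMask min_value max_value ≠ findMask_alt min_value max_value

-- ===== LEMMAS AND PROOFS =====

-- bitLength of a natural cast, as an inequality against 2^i
lemma bitLength_le_iff (n : Nat) (i : Nat) :
    PySem.Int.bitLength (n : Int) ≤ i ↔ n < 2 ^ i := by
  constructor
  · intro h
    have hlt := PySem.Int.lt_two_pow_bitLength (n : Int)
    simp only [Int.natAbs_natCast] at hlt
    exact lt_of_lt_of_le hlt (Nat.pow_le_pow_right (by norm_num) h)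
  · intro h
    rcases Nat.eq_zero_or_pos n with rfl | hn
    · simp [PySem.Int.bitLength_zero]
    · have hne : (n : Int) ≠ 0 := by exact_mod_cast hn.ne'
      have h2 := PySem.Int.two_pow_bitLength_le (n : Int) hne
      simp only [Int.natAbs_natCast] at h2
      by_contra hgt
      have h3 : 2 ^ i ≤ n := le_trans (Nat.pow_le_pow_right (by norm_num) (by omega)) h2
      omega

-- the low-bits constant: ~((2^32-1) << i) & (2^32-1) = 2^i - 1 for i ≤ 32
lemma low_bits_eq (i : Nat) (h : i ≤ 32) :
    PySem.Int.band (Int.not ((0xFFFFFFFF : Int) <<< i)) 0xFFFFFFFF = ((2 ^ i - 1 : Nat) : Int) := by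
  interval_cases i <;> decide

-- mask as a cast of a Nat
lemma mask_cast (i : Nat) : ((0xFFFFFFFF : Int) <<< i) = (((0xFFFFFFFF : Nat) <<< i : Nat) : Int) := by
  rw [Int.natCast_shiftLeft]; norm_num

-- x & mask clears exactly the low i bits (x < 2^32, i ≤ 32)
lemma and_mask_eq (X i : Nat) (hX : X < 2 ^ 32) (hi : i ≤ 32) :
    X &&& ((0xFFFFFFFF : Nat) <<< i) = (X / 2 ^ i) * 2 ^ i := by
  have : (X / 2 ^ i) * 2 ^ i = (X >>> i) <<< i := by
    rw [Nat.shiftRight_eq_div_pow, Nat.shiftLeft_eq]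
  rw [this]
  apply Nat.eq_of_testBit_eq
  intro j
  rw [Nat.testBit_and, Nat.testBit_shiftLeft, Nat.testBit_shiftLeft, Nat.testBit_shiftRight]
  by_cases hij : i ≤ j
  · simp only [hij, decide_true, Bool.true_and]
    by_cases hj32 : j < 32 + i
    · have : (0xFFFFFFFF : Nat) = 2 ^ 32 - 1 := by norm_num
      rw [this, Nat.testBit_two_pow_sub_one]
      have : i + (j - i) = j := by omega
      simp [Nat.sub_lt_iff_lt_add hij, hj32, this]
    · -- j ≥ 32 + i : both sides read a bit of X above 2^32
      have hx : X.testBit j = false := Nat.testBit_lt_two_pow (lt_of_lt_of_le hX (Nat.pow_le_pow_right (by norm_num) (by omega)))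
      have hx' : X.testBit (i + (j - i)) = false := by
        have : i + (j - i) = j := by omega
        rw [this]; exact hx
      simp [hx, hx']
  · simp [hij]

-- the break condition at shift i is exactly "min and max agree above bit i"
lemma cond_iff (X Y i : Nat) (hX : X < 2 ^ 32) (hi : i ≤ 32) :
    (((X &&& ((0xFFFFFFFF : Nat) <<< i) : Nat) : Int) ≤ (Y : Int) ∧
     (Y : Int) ≤ ((X &&& ((0xFFFFFFFF : Nat) <<< i) ||| (2 ^ i - 1) : Nat) : Int))
    ↔ X ^^^ Y < 2 ^ i := by
  rw [Int.ofNat_le, Int.ofNat_le, and_mask_eq X i hX hi]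
  have hpow : 0 < 2 ^ i := Nat.two_pow_pos i
  have hor : (X / 2 ^ i) * 2 ^ i ||| (2 ^ i - 1) = (X / 2 ^ i) * 2 ^ i + (2 ^ i - 1) := by
    rw [← Nat.shiftLeft_eq]
    exact (Nat.shiftLeft_add_eq_or_of_lt (by omega) (X / 2 ^ i)).symm
  rw [hor]
  have hxor : X ^^^ Y < 2 ^ i ↔ X / 2 ^ i = Y / 2 ^ i := by
    constructor
    · intro h
      have h0 : (X ^^^ Y) >>> i = 0 := by
        rw [Nat.shiftRight_eq_div_pow]; exact Nat.div_eq_of_lt h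
      rw [Nat.shiftRight_xor_distrib] at h0
      have h1 := Nat.xor_eq_zero_iff.mp h0
      rwa [Nat.shiftRight_eq_div_pow, Nat.shiftRight_eq_div_pow] at h1
    · intro h
      have h0 : (X ^^^ Y) / 2 ^ i = 0 := by
        have h1 : (X ^^^ Y) >>> i = 0 := by
          rw [Nat.shiftRight_xor_distrib, Nat.shiftRight_eq_div_pow, Nat.shiftRight_eq_div_pow, h]
          simp
        rwa [Nat.shiftRight_eq_div_pow] at h1
      rcases (Nat.div_eq_zero_iff).mp h0 with h' | h'
      · omega
      · exact h'
  rw [hxor]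
  have hxd := Nat.div_add_mod X (2 ^ i)
  have hyd := Nat.div_add_mod Y (2 ^ i)
  have hxm : X % 2 ^ i < 2 ^ i := Nat.mod_lt _ hpow
  have hym : Y % 2 ^ i < 2 ^ i := Nat.mod_lt _ hpow
  constructor
  · rintro ⟨h1, h2⟩
    have hle : X / 2 ^ i ≤ Y / 2 ^ i := (Nat.le_div_iff_mul_le hpow).mpr h1
    have hlt : Y / 2 ^ i < X / 2 ^ i + 1 := (Nat.div_lt_iff_lt_mul hpow).mpr (by
      have : (X / 2 ^ i + 1) * 2 ^ i = X / 2 ^ i * 2 ^ i + 2 ^ i := by ring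
      omega)
    omega
  · intro h
    have hc : X / 2 ^ i * 2 ^ i = 2 ^ i * (Y / 2 ^ i) := by rw [h]; ring
    omega

-- the loop, started at shift i with the break index k0 still ahead, returns the mask at k0
lemma loop_eq (X Y : Nat) (hX : X < 2 ^ 32) (hY : Y < 2 ^ 32) :
    ∀ (fuel i : Nat), i ≤ PySem.Int.bitLength ((X ^^^ Y : Nat) : Int) → 33 ≤ fuel + i →
      findMaskLoop (X : Int) (Y : Int) fuel ((0xFFFFFFFF : Int) <<< i) =
        PySem.Int.band ((0xFFFFFFFF : Int) <<< PySem.Int.bitLength ((X ^^^ Y : Nat) : Int)) 0xFFFFFFFF := by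
  have hk32 : PySem.Int.bitLength ((X ^^^ Y : Nat) : Int) ≤ 32 :=
    (bitLength_le_iff _ 32).mpr (Nat.xor_lt_two_pow hX hY)
  intro fuel
  induction fuel with
  | zero => intro i hik hfi; omega
  | succ f ih =>
    intro i hik hfi
    have hi32 : i ≤ 32 := le_trans hik hk32
    show (let network_min := PySem.Int.band (X : Int) ((0xFFFFFFFF : Int) <<< i);
          let network_max := PySem.Int.bor network_min (PySem.Int.band (Int.not ((0xFFFFFFFF : Int) <<< i)) 0xFFFFFFFF);
          if network_min ≤ (Y : Int) ∧ (Y : Int) ≤ network_max then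
            PySem.Int.band ((0xFFFFFFFF : Int) <<< i) 0xFFFFFFFF
          else findMaskLoop (X : Int) (Y : Int) f (((0xFFFFFFFF : Int) <<< i) <<< 1)) = _
    rw [low_bits_eq i hi32, mask_cast i]
    simp only [PySem.Int.band_natCast, PySem.Int.bor_natCast]
    by_cases hc : (((X &&& ((0xFFFFFFFF : Nat) <<< i) : Nat) : Int) ≤ (Y : Int) ∧
        (Y : Int) ≤ ((X &&& ((0xFFFFFFFF : Nat) <<< i) ||| (2 ^ i - 1) : Nat) : Int))
    · have hlt : X ^^^ Y < 2 ^ i := (cond_iff X Y i hX hi32).mp hc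
      have : PySem.Int.bitLength ((X ^^^ Y : Nat) : Int) ≤ i := (bitLength_le_iff _ i).mpr hlt
      have hik' : i = PySem.Int.bitLength ((X ^^^ Y : Nat) : Int) := by omega
      subst hik'
      rw [if_pos hc, mask_cast]
    · have hnlt : ¬ (X ^^^ Y < 2 ^ i) := fun h => hc ((cond_iff X Y i hX hi32).mpr h)
      have hik' : i + 1 ≤ PySem.Int.bitLength ((X ^^^ Y : Nat) : Int) := by
        by_contra hcon
        exact hnlt ((bitLength_le_iff _ i).mp (by omega))
      rw [if_neg hc]
      have hshift : ((0xFFFFFFFF : Int) <<< i) <<< (1 : Int) = (0xFFFFFFFF : Int) <<< (i + 1) := by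
        have h1 : ((0xFFFFFFFF : Int) <<< i) <<< (1 : Int) = ((0xFFFFFFFF : Int) <<< i) <<< (1 : Nat) := by
          exact_mod_cast Int.shiftLeft_natCast_right ((0xFFFFFFFF : Int) <<< i) 1
        rw [h1, Int.shiftLeft_eq, Int.shiftLeft_eq, Int.shiftLeft_eq]
        ring
      rw [← mask_cast]
      rw [hshift]
      exact ih (i + 1) hik' (by omega)

-- agreement on the nonnegative part of Pre_
lemma main_eq (X Y : Nat) (hX : X < 2 ^ 32) (hY : Y < 2 ^ 32) :
    findMask (X : Int) (Y : Int) = findMask_alt (X : Int) (Y : Int) := by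
  have hx : PySem.Int.bxor (X : Int) (Y : Int) = ((X ^^^ Y : Nat) : Int) := by
    simp [PySem.Int.bxor_natCast]
  unfold findMask findMask_alt
  rw [hx]
  conv_lhs => rw [show (0xFFFFFFFF : Int) = (0xFFFFFFFF : Int) <<< (0 : Nat) from by decide]
  exact loop_eq X Y hX hY 64 0 (Nat.zero_le _) (by omega)

-- ===== VERDICT =====
theorem findMask_spec : Claim_unchanged_findMask := by
  intro mi ma hdom hpre hnd
  rcases hpre with ⟨h1, h2⟩ | hD
  · have hdom' : mi ≤ 2147483648 ∧ ma ≤ 2147483648 := by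
      unfold Dom_findMask pvDomInt at hdom
      simp only [Bool.and_eq_true, decide_eq_true_eq] at hdom
      exact ⟨hdom.1.2, hdom.2.2⟩
    obtain ⟨X, rfl⟩ : ∃ X : Nat, mi = (X : Int) := ⟨mi.toNat, (Int.toNat_of_nonneg h1).symm⟩
    obtain ⟨Y, rfl⟩ : ∃ Y : Nat, ma = (Y : Int) := ⟨ma.toNat, (Int.toNat_of_nonneg h2).symm⟩
    have hXi : (X : Int) < 2 ^ 32 := lt_of_le_of_lt hdom'.1 (by norm_num)
    have hYi : (Y : Int) < 2 ^ 32 := lt_of_le_of_lt hdom'.2 (by norm_num)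
    exact main_eq X Y (by exact_mod_cast hXi) (by exact_mod_cast hYi)
  · exact absurd hD hnd

theorem findMask_changed : Claim_changed_findMask := by
  unfold Claim_changed_findMask; decide

theorem findMask_tight : Claim_exact_findMask := by
  intro mi ma _ _ hD
  obtain ⟨rfl, rfl⟩ := hD
  decide
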